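-- pv_equiv track=rewrite | github.com/gribbg/pillow_svg | pillow_svg/SvgImagePlugin.py | parse_transform
-- ===== SOURCE A (Python) =====
-- def parse_transform(transform):
--     transformList = [ ]
--     xfs = transform.split(")")
--     for xf in xfs:
--         if xf.find("(") != -1:
--             op = xf[:xf.index("(")]
--             params = xf[xf.index("(")+1:].split(",")
--             transformList.append((op, params))
--     return transformList
-- ===== SOURCE B (Python) =====
-- def parse_transform(transform):
--     # One-pass character state machine (no split/index/slicing passes).
--     result = []
--     op = []
--     params = None  # None = outside parentheses; else list of current param char-buffers
--     for ch in transform: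
--         if params is None:
--             if ch == '(':
--                 params = [[]]
--             elif ch == ')':
--                 op = []
--             else:
--                 op.append(ch)
--         else:
--             if ch == ')':
--                 result.append((''.join(op), [''.join(p) for p in params]))
--                 op = []
--                 params = None
--             elif ch == ',':
--                 params.append([])
--             else:
--                 params[-1].append(ch)
--     if params is not None:
--         result.append((''.join(op), [''.join(p) for p in params]))
--     return result
-- ===== Notes on version B (the rewrite author's own statement) =====
-- stated objective: alternative
-- what changed: Replaces the split-on-close-paren pass plus per-chunk find/index/slice/comma-split passes with a single character-by-character state machine that builds the op and parameter buffers in one pass.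
import Mathlib
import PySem

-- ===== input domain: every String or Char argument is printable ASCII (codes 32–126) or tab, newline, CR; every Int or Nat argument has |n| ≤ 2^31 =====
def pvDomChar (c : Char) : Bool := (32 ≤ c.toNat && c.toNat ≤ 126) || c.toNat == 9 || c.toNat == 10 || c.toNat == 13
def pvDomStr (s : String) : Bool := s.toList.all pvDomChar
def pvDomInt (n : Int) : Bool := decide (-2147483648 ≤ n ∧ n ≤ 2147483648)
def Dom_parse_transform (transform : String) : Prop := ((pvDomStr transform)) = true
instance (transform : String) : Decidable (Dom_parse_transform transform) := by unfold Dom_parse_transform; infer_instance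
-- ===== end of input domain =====

-- B replaces A's split + per-chunk find/slice/split passes by a single
-- character-by-character state machine (alternative decomposition, same O(n) cost).

-- ===== PORT A =====
-- literal port of A: split on the closing paren; for each chunk containing an open paren,
-- op = chunk before the first open paren, params = comma-split of the chunk after it
-- (xf.index equals xf.find under the guard)
def parse_transform (transform : String) : List (String × List String) :=
  let xfs := PySem.Chars.splitOn transform.toList [')']
  xfs.foldl (fun transformList xf =>
    if PySem.Chars.find xf ['('] ≠ -1 then
      let op := PySem.Chars.slice xf none (some (PySem.Chars.find xf ['(']))
      let params := PySem.Chars.splitOn (PySem.Chars.slice xf (some (PySem.Chars.find xf ['('] + 1)) none) [',']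
      transformList ++ [(String.ofList op, params.map String.ofList)]
    else transformList) []

-- ===== PORT B =====
-- params[-1].append(ch)
def pvAppendLast (ps : List (List Char)) (c : Char) : List (List Char) :=
  match ps with
  | [] => []
  | [p] => [p ++ [c]]
  | p :: rest => p :: pvAppendLast rest c

-- the loop of Source B: state = (result, op buffer, optional list of param buffers)
def pvGoB (acc : List (String × List String)) (op : List Char)
    (ps : Option (List (List Char))) : List Char → List (String × List String)
  | [] =>
    match ps with
    | none => acc
    | some qs => acc ++ [(String.ofList op, qs.map String.ofList)]
  | c :: rest =>
    match ps with
    | none =>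
      if c = '(' then pvGoB acc op (some [[]]) rest
      else if c = ')' then pvGoB acc [] none rest
      else pvGoB acc (op ++ [c]) none rest
    | some qs =>
      if c = ')' then pvGoB (acc ++ [(String.ofList op, qs.map String.ofList)]) [] none rest
      else if c = ',' then pvGoB acc op (some (qs ++ [[]])) rest
      else pvGoB acc op (some (pvAppendLast qs c)) rest

def parse_transform_alt (transform : String) : List (String × List String) :=
  pvGoB [] [] none transform.toList

-- ===== PRECONDITION & SPEC =====
def Spec_parse_transform (transform : String) (out : List (String × List String)) : Prop := out = parse_transform_alt transform
instance (transform : String) (out : List (String × List String)) : Decidable (Spec_parse_transform transform out) := by unfold Spec_parse_transform; infer_instance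

-- ===== CLAIM (what is proved, stated in full; the proofs are below) =====
def Claim_equal_parse_transform : Prop := ∀ (transform : String), Dom_parse_transform transform → Spec_parse_transform transform (parse_transform transform)

-- ===== LEMMAS AND PROOFS =====

-- recursive characterization of splitting on a single character, with the pending chunk prefix
def splitC (s : Char) (pre : List Char) : List Char → List (List Char)
  | [] => [pre]
  | c :: rest => if c = s then pre :: splitC s [] rest else splitC s (pre ++ [c]) rest

theorem splitOn_go_eq (s : Char) : ∀ (fuel : Nat) (l cur : List Char) (acc : List (List Char)),
    l.length ≤ fuel →
    PySem.Chars.splitOn.go [s] fuel l cur acc = acc.reverse ++ splitC s cur.reverse l := by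
  intro fuel
  induction fuel with
  | zero =>
    intro l cur acc hl
    have : l = [] := List.length_eq_zero_iff.mp (Nat.le_zero.mp hl)
    subst this
    simp [PySem.Chars.splitOn.go, splitC]
  | succ fuel ih =>
    intro l cur acc hl
    cases l with
    | nil => simp [PySem.Chars.splitOn.go, splitC]
    | cons c rest =>
      by_cases hc : c = s
      · subst hc
        have hpre : [c].isPrefixOf (c :: rest) = true := by simp [List.isPrefixOf]
        rw [PySem.Chars.splitOn.go, if_pos hpre]
        simp only [List.length_cons] at hl
        rw [ih _ _ _ (by simpa using Nat.le_of_succ_le_succ hl)]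
        simp [splitC]
      · have hpre : [s].isPrefixOf (c :: rest) = false := by
          simp [List.isPrefixOf]
          exact fun h => absurd h.symm hc
        rw [PySem.Chars.splitOn.go, if_neg (by simp [hpre])]
        simp only [List.length_cons] at hl
        rw [ih _ _ _ (Nat.le_of_succ_le_succ hl)]
        simp [splitC, hc]

theorem splitOn_eq (s : Char) (l : List Char) :
    PySem.Chars.splitOn l [s] = splitC s [] l := by
  rw [PySem.Chars.splitOn, splitOn_go_eq s _ _ _ _ (Nat.le_succ _)]
  simp

theorem splitC_no (s : Char) (pre l : List Char) (h : s ∉ l) :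
    splitC s pre l = [pre ++ l] := by
  induction l generalizing pre with
  | nil => simp [splitC]
  | cons c rest ih =>
    simp only [List.mem_cons, not_or] at h
    rw [splitC, if_neg (fun hc => h.1 hc.symm), ih _ h.2]
    simp

theorem splitC_yes (s : Char) (pre d1 d2 : List Char) (h : s ∉ d1) :
    splitC s pre (d1 ++ s :: d2) = (pre ++ d1) :: splitC s [] d2 := by
  induction d1 generalizing pre with
  | nil => simp [splitC]
  | cons c rest ih =>
    simp only [List.mem_cons, not_or] at h
    rw [List.cons_append, splitC, if_neg (fun hc => h.1 hc.symm), ih _ h.2]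
    simp

-- decomposition of a list at the first occurrence of c0
theorem decomp (c0 : Char) (xf : List Char) (h : c0 ∈ xf) :
    xf = xf.takeWhile (· ≠ c0) ++ c0 :: xf.drop ((xf.takeWhile (· ≠ c0)).length + 1) := by
  induction xf with
  | nil => cases h
  | cons c rest ih =>
    by_cases hc : c = c0
    · subst hc
      simp [List.takeWhile]
    · have hmem : c0 ∈ rest := by
        rcases List.mem_cons.mp h with h1 | h1
        · exact absurd h1.symm hc
        · exact h1
      rw [List.takeWhile_cons]
      simp only [ne_eq, hc, not_false_iff, decide_true, List.drop_succ_cons]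
      exact congrArg (c :: ·) (ih hmem)

theorem find_singleton_neg (c0 : Char) (xf : List Char) (h : c0 ∉ xf) :
    PySem.Chars.find xf [c0] = -1 := by
  rw [PySem.Chars.find_eq_neg_one_iff]
  intro hinf
  exact h (hinf.mem (by simp))

theorem find_singleton_pos (c0 : Char) (xf : List Char) (h : c0 ∈ xf) :
    PySem.Chars.find xf [c0] = ((xf.takeWhile (· ≠ c0)).length : Int) := by
  have hdecomp := decomp c0 xf h
  set tw := xf.takeWhile (· ≠ c0) with htw
  set d := xf.drop (tw.length + 1) with hd
  have hnonneg : 0 ≤ PySem.Chars.find xf [c0] := by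
    rw [PySem.Chars.find_nonneg_iff]
    exact ⟨tw, d, by simpa using hdecomp.symm⟩
  obtain ⟨hpre, hmin⟩ := PySem.Chars.find_spec hnonneg
  set n := (PySem.Chars.find xf [c0]).toNat with hn
  have hkey : n = tw.length := by
    rcases Nat.lt_trichotomy n tw.length with hlt | heq | hgt
    · exfalso
      obtain ⟨t, ht⟩ := hpre
      have hhead : (xf.drop n).head? = some c0 := by rw [← ht]; rfl
      rw [List.head?_drop] at hhead
      have hx : xf[n]? = tw[n]? := by
        conv_lhs => rw [hdecomp]
        exact List.getElem?_append_left hlt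
      rw [hx, List.getElem?_eq_getElem hlt] at hhead
      have hmem : tw[n] ∈ tw := List.getElem_mem hlt
      have := List.mem_takeWhile_imp hmem
      simp only [Option.some.injEq] at hhead
      simp [hhead] at this
    · exact heq
    · exfalso
      apply hmin tw.length hgt
      have : xf.drop tw.length = c0 :: d := by
        conv_lhs => rw [hdecomp]
        exact List.drop_left
      rw [this]
      exact ⟨d, rfl⟩
  omega

-- pvAppendLast on a nonempty buffer list appends to the last buffer
theorem appendLast_snoc (ps : List (List Char)) (cur : List Char) (c : Char) :
    pvAppendLast (ps ++ [cur]) c = ps ++ [cur ++ [c]] := by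
  induction ps with
  | nil => simp [pvAppendLast]
  | cons p rest ih =>
    cases rest with
    | nil => simp [pvAppendLast]
    | cons q qs => simpa [pvAppendLast] using ih

-- inside state, no close paren until the end of the input: flush at the end
theorem goB_in_no (ds : List Char) (hds : ')' ∉ ds) :
    ∀ (ps : List (List Char)) (cur : List Char) (acc : List (String × List String)) (op : List Char),
    pvGoB acc op (some (ps ++ [cur])) ds
      = acc ++ [(String.ofList op, (ps ++ splitC ',' cur ds).map String.ofList)] := by
  induction ds with
  | nil => intro ps cur acc op; simp [pvGoB, splitC]
  | cons c rest ih =>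
    intro ps cur acc op
    simp only [List.mem_cons, not_or] at hds
    by_cases hc : c = ','
    · subst hc
      rw [pvGoB, if_neg (by decide), if_pos rfl, ih hds.2 (ps ++ [cur]) []]
      simp [splitC]
    · rw [pvGoB, if_neg (fun h => hds.1 h.symm), if_neg hc, appendLast_snoc, ih hds.2]
      simp [splitC, hc]

-- inside state, first close paren at the end of d1: emit and continue outside
theorem goB_in_yes (d1 : List Char) (hds : ')' ∉ d1) :
    ∀ (d2 : List Char) (ps : List (List Char)) (cur : List Char) (acc : List (String × List String)) (op : List Char),
    pvGoB acc op (some (ps ++ [cur])) (d1 ++ ')' :: d2)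
      = pvGoB (acc ++ [(String.ofList op, (ps ++ splitC ',' cur d1).map String.ofList)]) [] none d2 := by
  induction d1 with
  | nil => intro d2 ps cur acc op; simp [pvGoB, splitC]
  | cons c rest ih =>
    intro d2 ps cur acc op
    simp only [List.mem_cons, not_or] at hds
    by_cases hc : c = ','
    · subst hc
      rw [List.cons_append, pvGoB, if_neg (by decide), if_pos rfl, ih hds.2 d2 (ps ++ [cur]) []]
      simp [splitC]
    · rw [List.cons_append, pvGoB, if_neg (fun h => hds.1 h.symm), if_neg hc, appendLast_snoc,
        ih hds.2]
      simp [splitC, hc]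

theorem takeWhile_mid (op rest : List Char) (hop : '(' ∉ op) :
    (op ++ '(' :: rest).takeWhile (· ≠ '(') = op := by
  induction op with
  | nil => simp
  | cons c cs ih =>
    simp only [List.mem_cons, not_or] at hop
    rw [List.cons_append, List.takeWhile_cons,
      if_pos (show (decide (c ≠ '(')) = true by simp; exact fun h => hop.1 h.symm), ih hop.2]

theorem drop_mid {α : Type} (op rest : List α) (c : α) :
    (op ++ c :: rest).drop (op.length + 1) = rest := by
  induction op with
  | nil => simp
  | cons a as ih => simp [ih]

-- the value A appends for one chunk (proof-side normal form)
def emitA (acc : List (String × List String)) (xf : List Char) : List (String × List String) :=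
  if '(' ∈ xf then
    acc ++ [(String.ofList (xf.takeWhile (· ≠ '(')),
      (splitC ',' [] (xf.drop ((xf.takeWhile (· ≠ '(')).length + 1))).map String.ofList)]
  else acc

theorem emitA_mid (acc : List (String × List String)) (op rest : List Char) (hop : '(' ∉ op) :
    emitA acc (op ++ '(' :: rest)
      = acc ++ [(String.ofList op, (splitC ',' [] rest).map String.ofList)] := by
  rw [emitA, if_pos (by simp), takeWhile_mid op rest hop, drop_mid]

-- outside state, no close paren until the end of the input
theorem goB_out_no (cs : List Char) (hcs : ')' ∉ cs) :
    ∀ (op : List Char) (_ : '(' ∉ op) (acc : List (String × List String)),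
    pvGoB acc op none cs = emitA acc (op ++ cs) := by
  induction cs with
  | nil =>
    intro op hop acc
    simp [pvGoB, emitA, hop]
  | cons c rest ih =>
    intro op hop acc
    simp only [List.mem_cons, not_or] at hcs
    by_cases hc : c = '('
    · subst hc
      rw [pvGoB, if_pos rfl]
      rw [show ([[]] : List (List Char)) = [] ++ [[]] from rfl, goB_in_no rest hcs.2,
        emitA_mid acc op rest hop]
      simp
    · rw [pvGoB, if_neg hc, if_neg (fun h => hcs.1 h.symm), ih hcs.2 (op ++ [c]) (by simp [hop]; exact fun h => hc h.symm)]
      simp [List.append_assoc]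

-- outside state, first close paren at the end of d1: process the chunk and continue
theorem goB_out_yes (d1 : List Char) (hd1 : ')' ∉ d1) :
    ∀ (d2 : List Char) (op : List Char) (_ : '(' ∉ op) (acc : List (String × List String)),
    pvGoB acc op none (d1 ++ ')' :: d2) = pvGoB (emitA acc (op ++ d1)) [] none d2 := by
  induction d1 with
  | nil =>
    intro d2 op hop acc
    simp [pvGoB, emitA, hop]
  | cons c rest ih =>
    intro d2 op hop acc
    simp only [List.mem_cons, not_or] at hd1
    by_cases hc : c = '('
    · subst hc
      rw [List.cons_append, pvGoB, if_pos rfl]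
      rw [show ([[]] : List (List Char)) = [] ++ [[]] from rfl, goB_in_yes rest hd1.2,
        emitA_mid acc op rest hop]
      simp
    · rw [List.cons_append, pvGoB, if_neg hc, if_neg (fun h => hd1.1 h.symm),
        ih hd1.2 d2 (op ++ [c]) (by simp [hop]; exact fun h => hc h.symm)]
      simp [List.append_assoc]

-- A's fold body, as a named function (proof-side only)
def bodyA (transformList : List (String × List String)) (xf : List Char) : List (String × List String) :=
  if PySem.Chars.find xf ['('] ≠ -1 then
    transformList ++ [(String.ofList (PySem.Chars.slice xf none (some (PySem.Chars.find xf ['(']))),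
      (PySem.Chars.splitOn (PySem.Chars.slice xf (some (PySem.Chars.find xf ['('] + 1)) none) [',']).map String.ofList)]
  else transformList

-- A's fold body equals emitA
theorem bodyA_eq_emitA (acc : List (String × List String)) (xf : List Char) :
    bodyA acc xf = emitA acc xf := by
  rw [bodyA]
  by_cases h : '(' ∈ xf
  · have hfind := find_singleton_pos '(' xf h
    have hdecomp := decomp '(' xf h
    set tw := xf.takeWhile (· ≠ '(') with htw
    set d := xf.drop (tw.length + 1) with hd
    rw [if_pos (by rw [hfind]; exact fun hc => by omega)]
    rw [emitA, if_pos h, hfind]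
    have hslice1 : PySem.Chars.slice xf none (some (tw.length : Int)) = tw := by
      rw [PySem.Chars.slice_eq_listSlice, PySem.List.slice_to_natCast]
      conv_lhs => rw [hdecomp]
      exact List.take_left
    have hslice2 : PySem.Chars.slice xf (some ((tw.length : Int) + 1)) none = d := by
      rw [PySem.Chars.slice_eq_listSlice]
      rw [show ((tw.length : Int) + 1) = ((tw.length + 1 : Nat) : Int) by push_cast; ring]
      rw [PySem.List.slice_from_natCast]
    rw [hslice1, hslice2, splitOn_eq]
  · rw [if_neg (by rw [find_singleton_neg '(' xf h]; simp), emitA, if_neg h]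

-- a single final chunk (no close paren in the input)
theorem main_no (cs : List Char) (h : ')' ∉ cs) (acc : List (String × List String)) :
    (splitC ')' [] cs).foldl bodyA acc = pvGoB acc [] none cs := by
  rw [splitC_no _ _ _ h, List.nil_append, List.foldl_cons, List.foldl_nil, bodyA_eq_emitA,
    goB_out_no cs h [] (by simp) acc, List.nil_append]

-- main induction: A's fold over the chunks equals B's state machine
theorem main_aux : ∀ (n : Nat) (cs : List Char), cs.length ≤ n →
    ∀ (acc : List (String × List String)),
    (splitC ')' [] cs).foldl bodyA acc = pvGoB acc [] none cs := by
  intro n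
  induction n with
  | zero =>
    intro cs hlen acc
    have hcs : cs = [] := List.length_eq_zero_iff.mp (Nat.le_zero.mp hlen)
    subst hcs
    exact main_no [] (by simp) acc
  | succ n ih =>
    intro cs hlen acc
    by_cases h : ')' ∈ cs
    · have hdecomp := decomp ')' cs h
      set d1 := cs.takeWhile (· ≠ ')') with hd1
      set d2 := cs.drop (d1.length + 1) with hd2
      have hd1n : ')' ∉ d1 := fun hm => by
        have := List.mem_takeWhile_imp hm
        simp at this
      have hlen2 : d2.length ≤ n := by
        have : cs.length = d1.length + 1 + d2.length := by
          conv_lhs => rw [hdecomp]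
          simp
          omega
        omega
      conv_lhs => rw [hdecomp]
      conv_rhs => rw [hdecomp]
      rw [splitC_yes _ _ _ _ hd1n, List.nil_append, List.foldl_cons, bodyA_eq_emitA,
        goB_out_yes d1 hd1n d2 [] (by simp) acc, List.nil_append]
      exact ih d2 hlen2 (emitA acc d1)
    · exact main_no cs h acc

-- ===== VERDICT (by name: the statement is the Claim_ definition above) =====
theorem parse_transform_spec : Claim_equal_parse_transform := by
  intro transform _
  unfold Spec_parse_transform parse_transform parse_transform_alt
  rw [splitOn_eq]
  exact main_aux transform.toList.length transform.toList le_rfl []
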